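-- pv_equiv track=rewrite | github.com/k-rea1/algorithms-templates | python/sprint1_finals/1.py | previous_zero_distance
-- ===== SOURCE A (Python) =====
-- from typing import List
--
-- def previous_zero_distance(numbers: List[int]) -> List[int]:
--     """Функция получает на вход список чисел и возвращает для каждого числа
--     его расстояние до ближайшего предыдущего нуля. Если первое число в списке
--     равно нулю, вместо расстояния для этого числа возвращается длина списка"""
--
--     length = len(numbers)
--     distances = []
--     for id, item in enumerate(numbers):
--         if item == 0:
--             distances.append(0)
--         elif id == 0:
--             distances.append(length)
--         else:
--             distances.append(distances[id-1]+1)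
--     return distances
-- ===== SOURCE B (Python) =====
-- from typing import List
--
-- def previous_zero_distance(numbers: List[int]) -> List[int]:
--     """Segment decomposition: locate zeros and emit whole runs of distances as
--     ranges, instead of computing a per-element distance state."""
--     n = len(numbers)
--     if 0 not in numbers:
--         return list(range(n, 2 * n))
--     k = numbers.index(0)
--     out = list(range(n, n + k))
--     rest = numbers[k + 1:]
--     while True:
--         if 0 not in rest:
--             out.extend(range(0, len(rest) + 1))
--             return out
--         j = rest.index(0)
--         out.extend(range(0, j + 1))
--         rest = rest[j + 1:]
-- ===== Notes on version B (the rewrite author's own statement) =====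
-- stated objective: alternative
-- what changed: B abandons A's per-element distance propagation (each output = previous output + 1) for a segment decomposition: it finds the zero positions with index() and emits each run of distances wholesale as a range, slicing the list past each zero.
import Mathlib
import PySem

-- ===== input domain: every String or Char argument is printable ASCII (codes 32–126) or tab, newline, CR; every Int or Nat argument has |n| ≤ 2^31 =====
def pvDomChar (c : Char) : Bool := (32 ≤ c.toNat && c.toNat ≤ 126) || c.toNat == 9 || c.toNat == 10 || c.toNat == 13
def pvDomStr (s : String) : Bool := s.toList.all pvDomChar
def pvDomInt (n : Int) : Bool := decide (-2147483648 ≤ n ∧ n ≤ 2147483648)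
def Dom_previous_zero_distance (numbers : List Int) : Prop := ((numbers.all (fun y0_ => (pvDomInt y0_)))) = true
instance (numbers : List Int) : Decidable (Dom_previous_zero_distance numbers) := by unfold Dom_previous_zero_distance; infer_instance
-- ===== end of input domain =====

-- B replaces A's per-element distance propagation (each entry = previous entry + 1) by a
-- segment decomposition: it locates the zeros and emits whole runs of distances as ranges.

-- ===== PORT A =====
-- loop body of A: state is (distances, id); distances[id-1] is always in range
-- (id = distances.length > 0 in that branch), so the .getD 0 default is unreachable.
def pzdStepA (length : Int) (st : List Int × Int) (item : Int) : List Int × Int :=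
  let distances := st.1
  let id := st.2
  if item = 0 then (distances ++ [0], id + 1)
  else if id = 0 then (distances ++ [length], id + 1)
  else (distances ++ [((PySem.List.pyGet? distances (id - 1)).getD 0) + 1], id + 1)

def previous_zero_distance (numbers : List Int) : List Int :=
  let length : Int := numbers.length
  (numbers.foldl (pzdStepA length) ([], 0)).1

-- ===== PORT B =====
-- the while loop of B: out accumulates; rest is the part after the last consumed zero.
-- rest.idxOf 0 = rest.index(0) (exact under 0 ∈ rest); rest.drop (j+1) = rest[j+1:].
def pzdLoop (out rest : List Int) : List Int :=
  if h : (0 : Int) ∈ rest then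
    pzdLoop (out ++ PySem.List.pyRange 0 ((rest.idxOf 0 : Int) + 1) 1) (rest.drop (rest.idxOf 0 + 1))
  else out ++ PySem.List.pyRange 0 ((rest.length : Int) + 1) 1
termination_by rest.length
decreasing_by
  have := List.idxOf_lt_length_of_mem h
  simp only [List.length_drop]
  omega

def previous_zero_distance_alt (numbers : List Int) : List Int :=
  let n : Int := numbers.length
  if _h : (0 : Int) ∈ numbers then
    let k : Nat := numbers.idxOf 0              -- numbers.index(0)
    pzdLoop (PySem.List.pyRange n (n + (k : Int)) 1) (numbers.drop (k + 1))  -- numbers[k+1:]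
  else
    PySem.List.pyRange n (2 * n) 1

-- ===== PRECONDITION & SPEC =====
def Spec_previous_zero_distance (numbers : List Int) (out : List Int) : Prop := out = previous_zero_distance_alt numbers
instance (numbers : List Int) (out : List Int) : Decidable (Spec_previous_zero_distance numbers out) := by unfold Spec_previous_zero_distance; infer_instance

-- ===== CLAIM (what is proved, stated in full; the proofs are below) =====
def Claim_equal_previous_zero_distance : Prop := ∀ (numbers : List Int), Dom_previous_zero_distance numbers → Spec_previous_zero_distance numbers (previous_zero_distance numbers)

-- ===== LEMMAS AND PROOFS =====

-- reference function: element-wise distances, index i, last zero lz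
def pzdRef (n : Int) : List Int → Option Int → Int → List Int
  | [], _, _ => []
  | x :: xs, lz, i =>
    if x = 0 then 0 :: pzdRef n xs (some i) (i + 1)
    else (match lz with | none => n + i | some z => i - z) :: pzdRef n xs lz (i + 1)

-- distances after a zero depend only on the offset from it
def pzdSeg : List Int → Int → List Int
  | [], _ => []
  | x :: xs, d => if x = 0 then 0 :: pzdSeg xs 1 else d :: pzdSeg xs (d + 1)

-- value of the last accumulator element in A's loop, as the invariant sees it
def pzdLastVal (n : Int) (lz : Option Int) (m : Int) : Int :=
  match lz with
  | none => n + m - 1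
  | some z => m - 1 - z

theorem pzdRef_some_eq_seg (n : Int) (xs : List Int) (z i : Int) :
    pzdRef n xs (some z) i = pzdSeg xs (i - z) := by
  induction xs generalizing z i with
  | nil => rfl
  | cons x xs ih =>
    by_cases hx : x = 0
    · simp only [pzdRef, pzdSeg, hx, if_pos]
      rw [ih i (i + 1)]
      norm_num
    · simp only [pzdRef, pzdSeg, hx, ite_false]
      rw [ih z (i + 1)]
      congr 1
      ring_nf

theorem pzdSeg_zero_free (xs : List Int) (d : Int) (h : ∀ x ∈ xs, x ≠ 0) :
    pzdSeg xs d = PySem.List.pyRange d (d + xs.length) 1 := by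
  induction xs generalizing d with
  | nil => simp [pzdSeg, PySem.List.pyRange_one_eq_nil]
  | cons x xs ih =>
    have hx : x ≠ 0 := h x (by simp)
    simp only [pzdSeg, hx, ite_false, List.length_cons]
    push_cast
    rw [PySem.List.pyRange_one_cons (by omega)]
    rw [ih (d + 1) (fun y hy => h y (by simp [hy]))]
    have harith : d + 1 + (xs.length : Int) = d + ((xs.length : Int) + 1) := by ring
    rw [harith]

theorem pzdSeg_append_zero_free (ys zs : List Int) (d : Int) (h : ∀ x ∈ ys, x ≠ 0) :
    pzdSeg (ys ++ zs) d = PySem.List.pyRange d (d + ys.length) 1 ++ pzdSeg zs (d + ys.length) := by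
  induction ys generalizing d with
  | nil => simp [PySem.List.pyRange_one_eq_nil]
  | cons y ys ih =>
    have hy : y ≠ 0 := h y (by simp)
    simp only [List.cons_append, pzdSeg, hy, ite_false, List.length_cons]
    push_cast
    rw [PySem.List.pyRange_one_cons (by omega)]
    rw [ih (d + 1) (fun x hx => h x (by simp [hx]))]
    have harith : d + 1 + (ys.length : Int) = d + ((ys.length : Int) + 1) := by ring
    rw [harith]
    simp

theorem pzdLoop_eq_seg : ∀ (m : Nat) (rest out : List Int), rest.length ≤ m →
    pzdLoop out rest = out ++ 0 :: pzdSeg rest 1 := by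
  intro m
  induction m with
  | zero =>
    intro rest out hlen
    have : rest = [] := List.eq_nil_of_length_eq_zero (by omega)
    subst this
    rw [pzdLoop]
    simp only [List.not_mem_nil, dite_false, List.length_nil, pzdSeg]
    have : PySem.List.pyRange ((0:Int)) (((0:Nat) : Int) + 1) 1 = [0] := by decide
    rw [this]
  | succ m ih =>
    intro rest out hlen
    by_cases h : (0 : Int) ∈ rest
    · rw [pzdLoop, dif_pos h]
      have hj := List.idxOf_lt_length_of_mem h
      set j := rest.idxOf 0 with hjdef
      have hdec : rest = rest.take j ++ 0 :: rest.drop (j + 1) := by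
        conv_lhs => rw [← List.take_append_drop j rest]
        rw [List.drop_eq_getElem_cons hj, List.getElem_idxOf hj]
      have hfree : ∀ x ∈ rest.take j, x ≠ 0 := by
        intro x hx hzx
        subst hzx
        rw [hjdef, List.mem_take_iff_idxOf_lt h] at hx
        omega
      have hrec := ih (rest.drop (j + 1)) (out ++ PySem.List.pyRange 0 ((j : Int) + 1) 1)
        (by simp only [List.length_drop]; omega)
      rw [hrec]
      conv_rhs => rw [hdec]
      rw [pzdSeg_append_zero_free _ _ _ hfree]
      have htk : (rest.take j).length = j := List.length_take_of_le (by omega)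
      have hseg0 : pzdSeg (0 :: rest.drop (j + 1)) (1 + ((rest.take j).length : Int)) =
          0 :: pzdSeg (rest.drop (j + 1)) 1 := by simp [pzdSeg]
      rw [hseg0, htk]
      rw [PySem.List.pyRange_one_cons (show (0:Int) < (j:Int) + 1 by omega)]
      have harith : (1:Int) + (j : Int) = (j : Int) + 1 := by ring
      rw [harith]
      simp
    · rw [pzdLoop, dif_neg h]
      rw [pzdSeg_zero_free rest 1 (by intro x hx hzx; exact h (hzx ▸ hx))]
      rw [PySem.List.pyRange_one_cons (show (0:Int) < (rest.length:Int) + 1 by omega)]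
      have harith : (1:Int) + (rest.length : Int) = (rest.length : Int) + 1 := by ring
      rw [harith]
      simp

-- A's fold equals the reference, under the last-element invariant
theorem pzdA_eq_ref (n : Int) (xs : List Int) (d : List Int) (lz : Option Int)
    (hnil : d = [] → lz = none)
    (hlast : ∀ h : d ≠ [], d.getLast h = pzdLastVal n lz d.length) :
    (xs.foldl (pzdStepA n) (d, (d.length : Int))).1 = d ++ pzdRef n xs lz (d.length : Int) := by
  induction xs generalizing d lz with
  | nil => simp [pzdRef]
  | cons x xs ih =>
    simp only [List.foldl_cons]
    by_cases hx : x = 0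
    · have h1 : pzdStepA n (d, (d.length : Int)) x = (d ++ [0], (d.length : Int) + 1) := by
        simp [pzdStepA, hx]
      rw [h1]
      have hlen : ((d ++ [0]).length : Int) = (d.length : Int) + 1 := by simp
      rw [← hlen]
      rw [ih (d ++ [0]) (some (d.length : Int)) (by simp)
        (by intro h; simp [pzdLastVal])]
      simp [pzdRef, hx]
    · by_cases hd : d = []
      · subst hd
        have hlz := hnil rfl
        subst hlz
        have h1 : pzdStepA n (([] : List Int), ((([] : List Int).length : Nat) : Int)) x
            = ([n], (([] : List Int).length : Int) + 1) := by
          simp [pzdStepA, hx]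
        rw [h1]
        have hlen : (([n] : List Int).length : Int) = (([] : List Int).length : Int) + 1 := by simp
        rw [← hlen]
        rw [ih [n] none (by simp) (by intro h; simp [pzdLastVal])]
        simp [pzdRef, hx]
      · have hidne : ((d.length : Int)) ≠ 0 := by
          exact_mod_cast (fun h => hd (List.length_eq_zero_iff.mp h) : d.length ≠ 0)
        have hget : (PySem.List.pyGet? d ((d.length : Int) - 1)).getD 0 = d.getLast hd := by
          have h0 : 0 < d.length := List.length_pos_iff.mpr hd
          have : ((d.length : Int) - 1) = ((d.length - 1 : Nat) : Int) := by omega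
          rw [this, PySem.List.pyGet?_natCast]
          rw [List.getLast_eq_getElem]
          simp [List.getElem?_eq_getElem (by omega : d.length - 1 < d.length)]
        set v : Int := pzdLastVal n lz d.length + 1 with hv
        have h1 : pzdStepA n (d, (d.length : Int)) x = (d ++ [v], (d.length : Int) + 1) := by
          simp [pzdStepA, hx, hd, hget, hlast hd, hv]
        rw [h1]
        have hlen : ((d ++ [v]).length : Int) = (d.length : Int) + 1 := by simp
        rw [← hlen]
        have hnil' : d ++ [v] = [] → lz = none := by simp
        have hlast' : ∀ h : d ++ [v] ≠ [], (d ++ [v]).getLast h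
            = pzdLastVal n lz ((d ++ [v]).length : Int) := by
          intro h
          rw [List.getLast_append]
          cases lz with
          | none => simp [hv, pzdLastVal]; try ring
          | some z => simp [hv, pzdLastVal]; try ring
        rw [ih (d ++ [v]) lz hnil' hlast']
        cases lz with
        | none =>
          have hvn : v = n + (d.length : Int) := by simp [hv, pzdLastVal]; try ring
          simp [pzdRef, hx, hvn]
        | some z =>
          have hvz : v = (d.length : Int) - z := by simp [hv, pzdLastVal]; try ring
          simp [pzdRef, hx, hvz]

theorem pzdA_ref (numbers : List Int) :
    previous_zero_distance numbers = pzdRef (numbers.length : Int) numbers none 0 := by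
  unfold previous_zero_distance
  have := pzdA_eq_ref (numbers.length : Int) numbers [] none (fun _ => rfl)
    (fun h => absurd rfl h)
  simpa using this

-- the zero-free prefix of the reference, lz = none
theorem pzdRef_none_prefix (n : Int) (ys zs : List Int) (i : Int) (h : ∀ x ∈ ys, x ≠ 0) :
    pzdRef n (ys ++ zs) none i
      = PySem.List.pyRange (n + i) (n + i + ys.length) 1 ++ pzdRef n zs none (i + ys.length) := by
  induction ys generalizing i with
  | nil => simp [PySem.List.pyRange_one_eq_nil]
  | cons y ys ih =>
    have hy : y ≠ 0 := h y (by simp)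
    simp only [List.cons_append, pzdRef, hy, ite_false, List.length_cons]
    push_cast
    rw [PySem.List.pyRange_one_cons (by omega)]
    rw [ih (i + 1) (fun x hx => h x (by simp [hx]))]
    have e2 : n + (i + 1) + (ys.length : Int) = n + i + ((ys.length : Int) + 1) := by ring
    have e3 : i + 1 + (ys.length : Int) = i + ((ys.length : Int) + 1) := by ring
    have e1 : n + (i + 1) = n + i + 1 := by ring
    rw [e2, e3, e1]
    simp

-- ===== VERDICT (by name: the statement is the Claim_ definition above) =====
theorem previous_zero_distance_spec : Claim_equal_previous_zero_distance := by
  intro numbers _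
  unfold Spec_previous_zero_distance
  rw [pzdA_ref]
  unfold previous_zero_distance_alt
  by_cases h : (0 : Int) ∈ numbers
  · rw [dif_pos h]
    have hk := List.idxOf_lt_length_of_mem h
    set k := numbers.idxOf 0 with hkdef
    have hdec : numbers = numbers.take k ++ 0 :: numbers.drop (k + 1) := by
      conv_lhs => rw [← List.take_append_drop k numbers]
      rw [List.drop_eq_getElem_cons hk, List.getElem_idxOf hk]
    have hfree : ∀ x ∈ numbers.take k, x ≠ 0 := by
      intro x hx hzx
      subst hzx
      rw [hkdef, List.mem_take_iff_idxOf_lt h] at hx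
      omega
    have htk : (numbers.take k).length = k := List.length_take_of_le (by omega)
    set n : Int := (numbers.length : Int) with hn
    rw [pzdLoop_eq_seg (numbers.drop (k + 1)).length _ _ le_rfl]
    conv_lhs => rw [hdec]
    rw [pzdRef_none_prefix _ _ _ _ hfree, htk]
    have h0 : pzdRef n (0 :: numbers.drop (k + 1)) none ((0:Int) + (k : Int))
        = 0 :: pzdRef n (numbers.drop (k + 1)) (some ((0:Int) + (k : Int))) ((0:Int) + (k : Int) + 1) := by
      simp [pzdRef]
    rw [h0, pzdRef_some_eq_seg]
    norm_num
  · rw [dif_neg h]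
    have := pzdRef_none_prefix (numbers.length : Int) numbers [] 0
      (by intro x hx hzx; exact h (hzx ▸ hx))
    simp only [List.append_nil, pzdRef] at this
    rw [this]
    simp
    congr 1
    ring
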